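-- pv_equiv track=rewrite | github.com/Devjunku/TIL | python/백준 온라인 저지/2021.06.29/추첨을통해커피.py | confirm
-- ===== SOURCE A (Python) =====
-- def confirm(ans_score, scores):
--     total = 0
--     for a, s in zip(ans_score, scores):
--
--         if a < s:
--             return 'hacker'
--
--         total += s
--
--     if total >= 100: return 'draw'
--     else: return 'none'
-- ===== SOURCE B (Python) =====
-- def confirm(ans_score, scores):
--     # divide-and-conquer reduction: combine (hacked, total) from two halves
--     pairs = list(zip(ans_score, scores))
--
--     def reduce(lo, hi):
--         # (any a < s, sum of s) over pairs[lo:hi]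
--         if hi - lo == 0:
--             return (False, 0)
--         if hi - lo == 1:
--             a, s = pairs[lo]
--             return (a < s, s)
--         mid = (lo + hi) // 2
--         h1, t1 = reduce(lo, mid)
--         h2, t2 = reduce(mid, hi)
--         return (h1 or h2, t1 + t2)
--
--     hacked, total = reduce(0, len(pairs))
--     if hacked:
--         return 'hacker'
--     return 'draw' if total >= 100 else 'none'
-- ===== Notes on version B (the rewrite author's own statement) =====
-- stated objective: alternative
-- what changed: Replaced A's fused left-to-right early-exit accumulator loop with a divide-and-conquer reduction that recursively combines (hacked, total) pairs from two halves, then decides the verdict once at the top (valid since A never uses total when it returns 'hacker').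
import Mathlib
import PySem

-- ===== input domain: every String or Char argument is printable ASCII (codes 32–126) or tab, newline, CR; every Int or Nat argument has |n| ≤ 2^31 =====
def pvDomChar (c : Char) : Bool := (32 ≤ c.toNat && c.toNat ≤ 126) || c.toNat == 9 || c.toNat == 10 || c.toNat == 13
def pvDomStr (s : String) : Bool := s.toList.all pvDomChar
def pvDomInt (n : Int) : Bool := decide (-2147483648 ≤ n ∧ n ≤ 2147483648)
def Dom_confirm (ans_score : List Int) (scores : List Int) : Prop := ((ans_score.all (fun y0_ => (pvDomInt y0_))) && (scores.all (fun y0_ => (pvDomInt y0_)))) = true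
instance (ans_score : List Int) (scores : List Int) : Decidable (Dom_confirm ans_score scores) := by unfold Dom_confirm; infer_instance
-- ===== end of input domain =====

-- B replaces A's fused left-to-right early-exit accumulator loop by a divide-and-conquer
-- reduction combining (hacked, total) from two halves — an alternative of the same O(n) cost.

-- ===== PORT A =====
-- A's for-loop over zip with early return 'hacker' and a running total
def confirmLoop : List (Int × Int) → Int → String
  | [], total => if total ≥ 100 then "draw" else "none"
  | (a, s) :: rest, total =>
      if a < s then "hacker" else confirmLoop rest (total + s)

def confirm (ans_score : List Int) (scores : List Int) : String :=
  confirmLoop (ans_score.zip scores) 0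

-- ===== PORT B =====
-- B's recursive half-splitting reduce over the pair list (indices lo/hi become take/drop at mid)
def confirmReduce (l : List (Int × Int)) : Bool × Int :=
  if _h0 : l.length = 0 then (false, 0)
  else if _h1 : l.length = 1 then
    match l with
    | (a, s) :: _ => (decide (a < s), s)
    | [] => (false, 0)  -- unreachable (length = 1)
  else
    let mid := l.length / 2
    let r1 := confirmReduce (l.take mid)
    let r2 := confirmReduce (l.drop mid)
    (r1.1 || r2.1, r1.2 + r2.2)
termination_by l.length
decreasing_by
  · simp only [List.length_take]; omega
  · simp only [List.length_drop]; omega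

def confirm_alt (ans_score : List Int) (scores : List Int) : String :=
  let r := confirmReduce (ans_score.zip scores)
  if r.1 then "hacker"
  else if r.2 ≥ 100 then "draw" else "none"

-- ===== PRECONDITION & SPEC =====
def Spec_confirm (ans_score : List Int) (scores : List Int) (out : String) : Prop := out = confirm_alt ans_score scores
instance (ans_score : List Int) (scores : List Int) (out : String) : Decidable (Spec_confirm ans_score scores out) := by unfold Spec_confirm; infer_instance

-- ===== CLAIM (what is proved, stated in full; the proofs are below) =====
def Claim_equal_confirm : Prop := ∀ (ans_score : List Int) (scores : List Int), Dom_confirm ans_score scores → Spec_confirm ans_score scores (confirm ans_score scores)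

-- ===== LEMMAS AND PROOFS =====
-- A's loop, characterised: early exit iff some a < s, else total-so-far + remaining sum vs 100
theorem confirmLoop_eq (l : List (Int × Int)) : ∀ (total : Int),
    confirmLoop l total =
      if l.any (fun p => decide (p.1 < p.2)) then "hacker"
      else if total + (l.map (fun p => p.2)).sum ≥ 100 then "draw" else "none" := by
  induction l with
  | nil => intro total; simp [confirmLoop]
  | cons hd tl ih =>
      intro total
      obtain ⟨a, s⟩ := hd
      simp only [confirmLoop, List.any_cons, List.map_cons, List.sum_cons]
      by_cases h : a < s
      · simp [h]
      · rw [if_neg h, ih (total + s), decide_eq_false h]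
        simp only [Bool.false_or, add_assoc]
        rfl

-- B's reduce, characterised: the same two aggregates, by strong induction on the length
theorem confirmReduce_eq_aux : ∀ (n : Nat) (l : List (Int × Int)), l.length ≤ n →
    confirmReduce l = (l.any (fun p => decide (p.1 < p.2)), (l.map (fun p => p.2)).sum) := by
  intro n
  induction n with
  | zero =>
      intro l hl
      have : l = [] := List.length_eq_zero_iff.mp (Nat.le_zero.mp hl)
      subst this
      simp [confirmReduce]
  | succ n ih =>
      intro l hl
      rw [confirmReduce]
      by_cases h0 : l.length = 0
      · have : l = [] := List.length_eq_zero_iff.mp h0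
        subst this; simp
      · rw [dif_neg h0]
        by_cases h1 : l.length = 1
        · rw [dif_pos h1]
          match l, h1 with
          | [(a, s)], _ => simp
        · rw [dif_neg h1]
          have hlen : 2 ≤ l.length := by omega
          have hmid1 : 1 ≤ l.length / 2 := by omega
          have hmid2 : l.length / 2 < l.length := by omega
          simp only [ih (l.take (l.length / 2)) (by simp [List.length_take]; omega),
              ih (l.drop (l.length / 2)) (by simp [List.length_drop]; omega)]
          have hsplit : l.take (l.length / 2) ++ l.drop (l.length / 2) = l :=
            List.take_append_drop _ l
          conv_rhs => rw [← hsplit, List.any_append, List.map_append, List.sum_append]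

theorem confirmReduce_eq (l : List (Int × Int)) :
    confirmReduce l = (l.any (fun p => decide (p.1 < p.2)), (l.map (fun p => p.2)).sum) :=
  confirmReduce_eq_aux l.length l (le_refl _)

-- ===== VERDICT (by name: the statement is the Claim_ definition above) =====
theorem confirm_spec : Claim_equal_confirm := by
  intro ans scores _
  show confirm ans scores = confirm_alt ans scores
  rw [confirm, confirmLoop_eq, confirm_alt, confirmReduce_eq]
  simp
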